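-- pv_equiv track=rewrite | github.com/SimonS54/QBScanner | QBScanner.py | extract_issue
-- ===== SOURCE A (Python) =====
-- def extract_issue(text):
--     issue_marker = "ISSUE"
--     text_lines = text.split('\n')
--     issue_index = -1
--     for i, line in enumerate(text_lines):
--         if issue_marker in line:
--             issue_index = i
--             break
--
--     if issue_index != -1 and issue_index + 1 < len(text_lines):
--         return text_lines[issue_index + 1].strip()
--     return None
-- ===== SOURCE B (Python) =====
-- def extract_issue(text):
--     pos = text.find("ISSUE")
--     if pos == -1:
--         return None
--     nl = text.find('\n', pos)
--     if nl == -1: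
--         return None
--     end = text.find('\n', nl + 1)
--     if end == -1:
--         return text[nl + 1:].strip()
--     return text[nl + 1:end].strip()
-- ===== Notes on version B (the rewrite author's own statement) =====
-- stated objective: alternative
-- what changed: B never builds the line list: it locates the marker with one substring find, then the next two newline positions with indexed finds, and returns a single stripped slice of the flat text, replacing A's split-into-lines + enumerate scan + re-index.
import Mathlib
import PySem

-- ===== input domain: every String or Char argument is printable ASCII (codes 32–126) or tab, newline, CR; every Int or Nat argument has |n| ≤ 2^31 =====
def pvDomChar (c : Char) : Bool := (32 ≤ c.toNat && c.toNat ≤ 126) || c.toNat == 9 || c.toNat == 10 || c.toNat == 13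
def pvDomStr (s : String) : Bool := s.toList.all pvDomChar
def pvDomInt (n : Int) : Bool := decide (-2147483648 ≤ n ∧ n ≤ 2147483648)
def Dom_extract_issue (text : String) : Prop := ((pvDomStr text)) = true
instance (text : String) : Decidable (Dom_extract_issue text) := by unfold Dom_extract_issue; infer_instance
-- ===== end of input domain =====

-- B never splits the text into lines: it locates the marker and the two following newlines by
-- flat substring search and returns one slice, instead of A's split/enumerate/index scan (objective: alternative).

-- ===== PORT A =====
-- the 'for i, line in enumerate(...): if "ISSUE" in line: issue_index = i; break' loop
def pvFindLoop : List (Int × String) → Int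
  | [] => -1
  | (i, line) :: rest => if PySem.Str.isIn "ISSUE" line then i else pvFindLoop rest

def extract_issue (text : String) : Option String :=
  let text_lines := (PySem.Str.split? text "\n").getD []
  let issue_index := pvFindLoop (PySem.List.enumerate text_lines 0)
  if issue_index ≠ -1 ∧ issue_index + 1 < (text_lines.length : Int) then
    (PySem.List.pyGet? text_lines (issue_index + 1)).map PySem.Str.strip
  else
    none

-- ===== PORT B =====
-- pos = text.find("ISSUE"); nl = text.find('\n', pos); end = text.find('\n', nl+1); one slice
def extract_issue_alt (text : String) : Option String :=
  let pos := PySem.Str.find text "ISSUE"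
  if pos = -1 then none
  else
    let nl := PySem.Str.findFrom text "\n" pos
    if nl = -1 then none
    else
      let e := PySem.Str.findFrom text "\n" (nl + 1)
      if e = -1 then some (PySem.Str.strip (PySem.Str.slice text (some (nl + 1)) none))
      else some (PySem.Str.strip (PySem.Str.slice text (some (nl + 1)) (some e)))

-- ===== PRECONDITION & SPEC =====
def Spec_extract_issue (text : String) (out : Option String) : Prop := out = extract_issue_alt text
instance (text : String) (out : Option String) : Decidable (Spec_extract_issue text out) := by unfold Spec_extract_issue; infer_instance

-- ===== CLAIM (what is proved, stated in full; the proofs are below) =====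
def Claim_equal_extract_issue : Prop := ∀ (text : String), Dom_extract_issue text → Spec_extract_issue text (extract_issue text)

-- ===== LEMMAS AND PROOFS =====

-- A's result on the list of char-level lines
def pvAcore (L : List (List Char)) : Option (List Char) :=
  match L.findIdx? (fun l => PySem.Chars.isIn "ISSUE".toList l) with
  | some k => L[k+1]?.map PySem.Chars.strip
  | none => none

-- B's computation at char level
def pvBcore (cs : List Char) : Option (List Char) :=
  let pos := PySem.Chars.find cs "ISSUE".toList
  if pos = -1 then none
  else
    let nl := PySem.Chars.findFrom cs ['\n'] pos
    if nl = -1 then none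
    else
      let e := PySem.Chars.findFrom cs ['\n'] (nl + 1)
      if e = -1 then some (PySem.Chars.strip (PySem.List.slice cs (some (nl + 1)) none))
      else some (PySem.Chars.strip (PySem.List.slice cs (some (nl + 1)) (some e)))

-- split a char list at newlines: (first line, remaining lines)
def pvLinesOf : List Char → List Char × List (List Char)
  | [] => ([], [])
  | c :: t =>
      let p := pvLinesOf t
      if c = '\n' then ([], p.1 :: p.2) else (c :: p.1, p.2)

def pvJoin : List (List Char) → List Char
  | [] => []
  | [l] => l
  | l :: r => l ++ '\n' :: pvJoin r

lemma pvFindLoop_enum (xs : List String) (s : Int) :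
    pvFindLoop (PySem.List.enumerate xs s) =
      match xs.findIdx? (fun l => PySem.Str.isIn "ISSUE" l) with
      | some k => s + k
      | none => -1 := by
  induction xs generalizing s with
  | nil => simp [pvFindLoop, PySem.List.enumerate_nil]
  | cons a rest ih =>
    rw [PySem.List.enumerate_cons, List.findIdx?_cons]
    by_cases h : PySem.Str.isIn "ISSUE" a = true
    · simp only [pvFindLoop, h, if_pos]; simp
    · simp only [pvFindLoop, h, Bool.false_eq_true, if_false, ih (s + 1)]
      cases hf : rest.findIdx? (fun l => PySem.Str.isIn "ISSUE" l) with
      | none => simp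
      | some k => simp; ring

-- A as a function of its line list
lemma pvA_core (xs : List String) :
    (let issue_index := pvFindLoop (PySem.List.enumerate xs 0)
     if issue_index ≠ -1 ∧ issue_index + 1 < (xs.length : Int) then
       (PySem.List.pyGet? xs (issue_index + 1)).map PySem.Str.strip
     else none) =
      match xs.findIdx? (fun l => PySem.Str.isIn "ISSUE" l) with
      | some k => xs[k+1]?.map PySem.Str.strip
      | none => none := by
  rw [pvFindLoop_enum]
  cases hf : xs.findIdx? (fun l => PySem.Str.isIn "ISSUE" l) with
  | none => simp
  | some k =>
    have hk : k < xs.length := by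
      have := List.findIdx?_eq_some_iff_findIdx_eq.mp hf
      omega
    simp only [zero_add]
    by_cases hlt : (k : Int) + 1 < (xs.length : Int)
    · have hne : (k : Int) ≠ -1 := by omega
      rw [if_pos ⟨hne, hlt⟩]
      have he : (k : Int) + 1 = ((k + 1 : Nat) : Int) := by push_cast; ring
      rw [he, PySem.List.pyGet?_natCast]
    · have hge : xs.length ≤ k + 1 := by omega
      rw [if_neg (by omega)]
      rw [List.getElem?_eq_none hge]
      rfl

lemma pvAcore_map (L : List (List Char)) :
    (match (L.map String.ofList).findIdx? (fun l => PySem.Str.isIn "ISSUE" l) with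
      | some k => ((L.map String.ofList)[k+1]?).map PySem.Str.strip
      | none => none) = (pvAcore L).map String.ofList := by
  unfold pvAcore
  rw [List.findIdx?_map]
  have hpred : ((fun l => PySem.Str.isIn "ISSUE" l) ∘ String.ofList)
      = (fun l => PySem.Chars.isIn "ISSUE".toList l) := by
    funext cl
    simp [PySem.Str.isIn, String.toList_ofList]
  rw [hpred]
  cases hf : L.findIdx? (fun l => PySem.Chars.isIn "ISSUE".toList l) with
  | none => rfl
  | some k =>
    simp only [List.getElem?_map]
    cases hg : L[k+1]? with
    | none => rfl
    | some x => simp [PySem.Str.strip, String.toList_ofList]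

lemma pvA_to_core (text : String) :
    extract_issue text = (pvAcore (PySem.Chars.splitOn text.toList ['\n'])).map String.ofList := by
  have hsplit : (PySem.Str.split? text "\n").getD []
      = (PySem.Chars.splitOn text.toList ['\n']).map String.ofList := by
    simp [PySem.Str.split?, PySem.Chars.split?, show ("\n".toList) = ['\n'] from rfl]
  have h1 : extract_issue text =
      (match ((PySem.Str.split? text "\n").getD []).findIdx? (fun l => PySem.Str.isIn "ISSUE" l) with
        | some k => (((PySem.Str.split? text "\n").getD [])[k+1]?).map PySem.Str.strip
        | none => none) := pvA_core _
  rw [h1, hsplit, pvAcore_map]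

lemma pvB_to_core (text : String) :
    extract_issue_alt text = (pvBcore text.toList).map String.ofList := by
  unfold extract_issue_alt pvBcore
  simp only [PySem.Str.find, PySem.Str.findFrom, PySem.Str.slice, PySem.Str.strip,
    String.toList_ofList, PySem.Chars.slice_eq_listSlice,
    show ("\n".toList) = ['\n'] from rfl]
  split_ifs <;> simp

-- splitOn with separator "\n" computes pvLinesOf
lemma pvSplitOn_go_nil (sep : List Char) (f : Nat) (cur : List Char) (acc : List (List Char)) :
    PySem.Chars.splitOn.go sep f [] cur acc = (cur.reverse :: acc).reverse := by
  cases f with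
  | zero => simp [PySem.Chars.splitOn.go]
  | succ n => simp [PySem.Chars.splitOn.go]

lemma pvSplitOn_go_cons (sep : List Char) (f : Nat) (c : Char) (rest cur : List Char) (acc : List (List Char)) :
    PySem.Chars.splitOn.go sep (f + 1) (c :: rest) cur acc =
      if sep.isPrefixOf (c :: rest) then
        PySem.Chars.splitOn.go sep f (List.drop sep.length (c :: rest)) [] (cur.reverse :: acc)
      else PySem.Chars.splitOn.go sep f rest (c :: cur) acc := by
  rfl

lemma pvSplitOn_go_spec (l : List Char) : ∀ (f : Nat) (cur : List Char) (acc : List (List Char)),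
    l.length < f →
    PySem.Chars.splitOn.go ['\n'] f l cur acc =
      acc.reverse ++ (cur.reverse ++ (pvLinesOf l).1) :: (pvLinesOf l).2 := by
  induction l with
  | nil =>
    intro f cur acc _
    rw [pvSplitOn_go_nil]
    simp [pvLinesOf]
  | cons c t ih =>
    intro f cur acc hf
    cases f with
    | zero => omega
    | succ f' =>
      rw [pvSplitOn_go_cons]
      have hf' : t.length < f' := by simp only [List.length_cons] at hf; omega
      by_cases hc : c = '\n'
      · subst hc
        rw [if_pos (by simp [List.isPrefixOf])]
        rw [show List.drop (['\n'].length) ('\n' :: t) = t from rfl]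
        rw [ih f' [] (cur.reverse :: acc) hf']
        simp [pvLinesOf]
      · rw [if_neg (by simp [List.isPrefixOf]; intro h; exact absurd h.symm hc)]
        rw [ih f' (c :: cur) acc hf']
        simp [pvLinesOf, hc]

lemma pvSplitOn_nl (cs : List Char) :
    PySem.Chars.splitOn cs ['\n'] = (pvLinesOf cs).1 :: (pvLinesOf cs).2 := by
  unfold PySem.Chars.splitOn
  rw [pvSplitOn_go_spec cs (cs.length + 1) [] [] (by omega)]
  simp

lemma pvLinesOf_nlfree (cs : List Char) :
    '\n' ∉ (pvLinesOf cs).1 ∧ ∀ l ∈ (pvLinesOf cs).2, '\n' ∉ l := by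
  induction cs with
  | nil => simp [pvLinesOf]
  | cons c t ih =>
    by_cases hc : c = '\n'
    · subst hc
      simp only [pvLinesOf]
      refine ⟨by simp, ?_⟩
      intro l hl
      rcases List.mem_cons.mp hl with h | h
      · exact h ▸ ih.1
      · exact ih.2 l h
    · simp only [pvLinesOf, if_neg hc]
      refine ⟨?_, ih.2⟩
      intro h
      rcases List.mem_cons.mp h with h | h
      · exact hc h.symm
      · exact ih.1 h

lemma pvJoin_linesOf (cs : List Char) :
    pvJoin ((pvLinesOf cs).1 :: (pvLinesOf cs).2) = cs := by
  induction cs with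
  | nil => rfl
  | cons c t ih =>
    by_cases hc : c = '\n'
    · subst hc
      simp only [pvLinesOf]
      show [] ++ '\n' :: pvJoin ((pvLinesOf t).1 :: (pvLinesOf t).2) = '\n' :: t
      rw [ih]; rfl
    · simp only [pvLinesOf, if_neg hc]
      cases h2 : (pvLinesOf t).2 with
      | nil =>
        rw [h2] at ih
        have h1 : (pvLinesOf t).1 = t := ih
        show c :: (pvLinesOf t).1 = c :: t
        rw [h1]
      | cons q r =>
        rw [h2] at ih
        show (c :: (pvLinesOf t).1) ++ '\n' :: pvJoin (q :: r) = c :: t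
        simp only [List.cons_append]
        rw [show (pvLinesOf t).1 ++ '\n' :: pvJoin (q :: r) = pvJoin ((pvLinesOf t).1 :: q :: r) from rfl, ih]

-- find: first-occurrence characterisation
lemma pvInfix_of_prefix_drop (s sub : List Char) (i : Nat) (h : sub <+: s.drop i) : sub <:+: s := by
  obtain ⟨u, hu⟩ := h
  exact ⟨s.take i, u, by rw [List.append_assoc, hu, List.take_append_drop]⟩

lemma pvFind_eq_of (s sub : List Char) (p : Nat) (h1 : sub <+: s.drop p)
    (h2 : ∀ i < p, ¬ sub <+: s.drop i) : PySem.Chars.find s sub = p := by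
  have hinf : sub <:+: s := pvInfix_of_prefix_drop s sub p h1
  have h0 : 0 ≤ PySem.Chars.find s sub := (PySem.Chars.find_nonneg_iff s sub).mpr hinf
  obtain ⟨hq1, hq2⟩ := PySem.Chars.find_spec h0
  have hqp : (PySem.Chars.find s sub).toNat = p := by
    by_contra hne
    rcases Nat.lt_or_ge (PySem.Chars.find s sub).toNat p with h | h
    · exact h2 _ h hq1
    · exact hq2 p (by omega) h1
  omega

lemma pvPrefix_drop_append (l r sub : List Char) (i : Nat) (h : i + sub.length ≤ l.length) :
    (sub <+: (l ++ r).drop i) ↔ sub <+: l.drop i := by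
  have hi : i ≤ l.length := by omega
  rw [List.prefix_iff_eq_take, List.prefix_iff_eq_take,
    List.drop_append_of_le_length hi,
    List.take_append_of_le_length (by simp; omega)]

lemma pvNoSpan (l t sub : List Char) (i : Nat) (hnl : '\n' ∉ sub) (hi : i ≤ l.length)
    (hp : sub <+: (l ++ '\n' :: t).drop i) : i + sub.length ≤ l.length := by
  by_contra hgt
  have hj : l.length - i < sub.length := by omega
  have hget := hp.getElem hj
  rw [List.getElem_drop] at hget
  have hidx : i + (l.length - i) = l.length := by omega
  have hnl' : (l ++ '\n' :: t)[i + (l.length - i)]'(by simp; omega) = '\n' := by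
    simp only [hidx]
    rw [List.getElem_append_right (by omega)]
    simp
  rw [hnl'] at hget
  exact hnl (hget ▸ List.getElem_mem hj)

lemma pvDrop_beyond (l t : List Char) (j : Nat) :
    (l ++ '\n' :: t).drop (l.length + 1 + j) = t.drop j := by
  rw [show l.length + 1 + j = l.length + (1 + j) from by omega, List.drop_append]
  rw [List.drop_of_length_le (by omega)]
  simp [List.drop_succ_cons, show 1 + j = j + 1 from by omega]

lemma pvFind_left (l t sub : List Char) (hin : sub <:+: l) :
    PySem.Chars.find (l ++ '\n' :: t) sub = PySem.Chars.find l sub := by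
  have h0 : 0 ≤ PySem.Chars.find l sub := (PySem.Chars.find_nonneg_iff l sub).mpr hin
  obtain ⟨hp1, hp2⟩ := PySem.Chars.find_spec h0
  set p := (PySem.Chars.find l sub).toNat with hp
  have hlen : p + sub.length ≤ l.length := by
    have := hp1.length_le
    simp only [List.length_drop] at this
    have hple : PySem.Chars.find l sub ≤ (l.length : Int) := PySem.Chars.find_le_length l sub
    omega
  have := pvFind_eq_of (l ++ '\n' :: t) sub p
    ((pvPrefix_drop_append l ('\n' :: t) sub p hlen).mpr hp1)
    (fun i hi => fun hpre =>
      hp2 i hi ((pvPrefix_drop_append l ('\n' :: t) sub i (by omega)).mp hpre))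
  omega

lemma pvFind_right (l t sub : List Char) (hnl : '\n' ∉ sub) (hno : ¬ sub <:+: l) :
    PySem.Chars.find (l ++ '\n' :: t) sub =
      if sub <:+: t then (l.length : Int) + 1 + PySem.Chars.find t sub else -1 := by
  by_cases hint : sub <:+: t
  · rw [if_pos hint]
    have h0 : 0 ≤ PySem.Chars.find t sub := (PySem.Chars.find_nonneg_iff t sub).mpr hint
    obtain ⟨hp1, hp2⟩ := PySem.Chars.find_spec h0
    set p := (PySem.Chars.find t sub).toNat with hp
    have := pvFind_eq_of (l ++ '\n' :: t) sub (l.length + 1 + p)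
      (by rw [pvDrop_beyond]; exact hp1)
      (by
        intro i hi hpre
        rcases Nat.lt_or_ge l.length i with hil | hil
        · have hj : i = l.length + 1 + (i - l.length - 1) := by omega
          rw [hj, pvDrop_beyond] at hpre
          exact hp2 (i - l.length - 1) (by omega) hpre
        · have hsp := pvNoSpan l t sub i hnl hil hpre
          exact hno (pvInfix_of_prefix_drop l sub i
            ((pvPrefix_drop_append l ('\n' :: t) sub i hsp).mp hpre)))
    omega
  · rw [if_neg hint]
    rw [PySem.Chars.find_eq_neg_one_iff]
    intro hinf
    have hIn : PySem.Chars.isIn sub (l ++ '\n' :: t) = true :=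
      (PySem.Chars.isIn_iff_infix _ _).mpr hinf
    obtain ⟨j, hj⟩ := (PySem.Chars.exists_prefix_drop_iff_isIn sub (l ++ '\n' :: t)).mpr hIn
    rcases Nat.lt_or_ge l.length j with hjl | hjl
    · have hje : j = l.length + 1 + (j - l.length - 1) := by omega
      rw [hje, pvDrop_beyond] at hj
      exact hint (pvInfix_of_prefix_drop t sub _ hj)
    · have hsp := pvNoSpan l t sub j hnl hjl hj
      exact hno (pvInfix_of_prefix_drop l sub j
        ((pvPrefix_drop_append l ('\n' :: t) sub j hsp).mp hj))

lemma pvFind_nl_none (l : List Char) (hnl : '\n' ∉ l) : PySem.Chars.find l ['\n'] = -1 := by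
  rw [PySem.Chars.find_eq_neg_one_iff]
  intro hinf
  exact hnl (hinf.sublist.subset (by simp))

lemma pvFind_nl_boundary (l t : List Char) (hnl : '\n' ∉ l) :
    PySem.Chars.find (l ++ '\n' :: t) ['\n'] = l.length := by
  have := pvFind_eq_of (l ++ '\n' :: t) ['\n'] l.length
    (by rw [show l.length = l.length + 1 - 1 from rfl]
        have : (l ++ '\n' :: t).drop l.length = '\n' :: t := by
          rw [List.drop_append_of_le_length (le_refl _)]; simp
        rw [show l.length + 1 - 1 = l.length from rfl, this]
        exact ⟨t, rfl⟩)
    (by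
      intro i hi hpre
      have hget := hpre.getElem (by simp : 0 < (['\n'] : List Char).length)
      rw [List.getElem_drop] at hget
      have : (l ++ '\n' :: t)[i + 0]'(by simp; omega) = l[i]'(by omega) := by
        simp only [Nat.add_zero]
        exact List.getElem_append_left (by omega)
      rw [this] at hget
      simp only [List.getElem_cons_zero] at hget
      exact hnl (hget ▸ List.getElem_mem (by omega : i < l.length)))
  omega

-- pvBcore without the lets
lemma pvBcore_eq (cs : List Char) :
    pvBcore cs =
      if PySem.Chars.find cs "ISSUE".toList = -1 then none
      else if PySem.Chars.findFrom cs ['\n'] (PySem.Chars.find cs "ISSUE".toList) = -1 then none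
      else if PySem.Chars.findFrom cs ['\n']
              (PySem.Chars.findFrom cs ['\n'] (PySem.Chars.find cs "ISSUE".toList) + 1) = -1 then
        some (PySem.Chars.strip (PySem.List.slice cs
          (some (PySem.Chars.findFrom cs ['\n'] (PySem.Chars.find cs "ISSUE".toList) + 1)) none))
      else
        some (PySem.Chars.strip (PySem.List.slice cs
          (some (PySem.Chars.findFrom cs ['\n'] (PySem.Chars.find cs "ISSUE".toList) + 1))
          (some (PySem.Chars.findFrom cs ['\n']
            (PySem.Chars.findFrom cs ['\n'] (PySem.Chars.find cs "ISSUE".toList) + 1))))) := rfl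

lemma pvAcore_nil_tail (l : List Char) : pvAcore [l] = none := by
  unfold pvAcore
  rw [List.findIdx?_cons]
  by_cases h : PySem.Chars.isIn "ISSUE".toList l = true <;>
    simp only [show ("ISSUE".toList : List Char) = ['I','S','S','U','E'] from rfl] at h ⊢ <;>
    simp [h]

lemma pvAcore_hit (l l2 : List Char) (r : List (List Char))
    (h : PySem.Chars.isIn "ISSUE".toList l = true) :
    pvAcore (l :: l2 :: r) = some (PySem.Chars.strip l2) := by
  unfold pvAcore
  rw [List.findIdx?_cons]
  simp only [show ("ISSUE".toList : List Char) = ['I','S','S','U','E'] from rfl] at h ⊢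
  simp [h]

lemma pvAcore_cons (l : List Char) (L : List (List Char))
    (h : PySem.Chars.isIn "ISSUE".toList l = false) :
    pvAcore (l :: L) = pvAcore L := by
  unfold pvAcore
  rw [List.findIdx?_cons]
  simp only [h, Bool.false_eq_true, if_false]
  cases hf : L.findIdx? (fun l => PySem.Chars.isIn "ISSUE".toList l) with
  | none => simp
  | some k => simp

-- B returns nothing when the whole text is a single marker-free-or-last line
lemma pvBcore_single (l : List Char) (hl : '\n' ∉ l) : pvBcore l = none := by
  rw [pvBcore_eq]
  by_cases hf : PySem.Chars.find l "ISSUE".toList = -1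
  · rw [if_pos hf]
  · rw [if_neg hf]
    have h0 : 0 ≤ PySem.Chars.find l "ISSUE".toList := by
      have := PySem.Chars.neg_one_le_find l "ISSUE".toList
      omega
    set p := (PySem.Chars.find l "ISSUE".toList).toNat with hp
    have hpe : PySem.Chars.find l "ISSUE".toList = (p : Int) := by omega
    have hple : p ≤ l.length := by
      have := PySem.Chars.find_le_length l "ISSUE".toList
      omega
    have hnl := PySem.Chars.findFrom_natCast l ['\n'] p hple
    rw [pvFind_nl_none (List.drop p l) (fun h => hl (List.mem_of_mem_drop h))] at hnl
    norm_num at hnl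
    rw [hpe, hnl]
    norm_num

-- skipping a marker-free first line leaves B's result unchanged
lemma pvBcore_skip (l t : List Char) (hno : ¬ "ISSUE".toList <:+: l) :
    pvBcore (l ++ '\n' :: t) = pvBcore t := by
  have hnlsub : '\n' ∉ "ISSUE".toList := by decide
  have hfr := pvFind_right l t "ISSUE".toList hnlsub hno
  rw [pvBcore_eq, pvBcore_eq]
  by_cases hint : "ISSUE".toList <:+: t
  case neg =>
    rw [hfr, if_neg hint, if_pos rfl,
      (PySem.Chars.find_eq_neg_one_iff t "ISSUE".toList).mpr hint, if_pos rfl]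
  case pos =>
    have h0t : 0 ≤ PySem.Chars.find t "ISSUE".toList :=
      (PySem.Chars.find_nonneg_iff t "ISSUE".toList).mpr hint
    set p := (PySem.Chars.find t "ISSUE".toList).toNat with hpdef
    have hpt : PySem.Chars.find t "ISSUE".toList = (p : Int) := by omega
    have hple : p ≤ t.length := by
      have := PySem.Chars.find_le_length t "ISSUE".toList
      omega
    have hs : PySem.Chars.find (l ++ '\n' :: t) "ISSUE".toList = ((l.length + 1 + p : Nat) : Int) := by
      rw [hfr, if_pos hint, hpt]; push_cast; ring
    have hlen_s : (l ++ '\n' :: t).length = l.length + 1 + t.length := by simp; omega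
    have hnl_s := PySem.Chars.findFrom_natCast (l ++ '\n' :: t) ['\n'] (l.length + 1 + p) (by omega)
    have hnl_t := PySem.Chars.findFrom_natCast t ['\n'] p hple
    rw [pvDrop_beyond l t p] at hnl_s
    rw [hs, hpt, hnl_s, hnl_t, if_neg (by omega : ¬ ((l.length + 1 + p : Nat) : Int) = -1),
      if_neg (by omega : ¬ ((p : Nat) : Int) = -1)]
    by_cases hm : PySem.Chars.find (List.drop p t) ['\n'] = -1
    · rw [hm]
      norm_num
    · have h0m : 0 ≤ PySem.Chars.find (List.drop p t) ['\n'] := by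
        have := PySem.Chars.neg_one_le_find (List.drop p t) ['\n']
        omega
      set m := (PySem.Chars.find (List.drop p t) ['\n']).toNat with hmdef
      have hmt : PySem.Chars.find (List.drop p t) ['\n'] = (m : Int) := by omega
      have hmb : m + 1 ≤ t.length - p := by
        obtain ⟨hp1, _⟩ := PySem.Chars.find_spec h0m
        have := hp1.length_le
        simp only [List.length_drop] at this
        rw [← hmdef] at this
        simp at this
        omega
      rw [hmt, if_neg (by omega : ¬ ((m : Nat) : Int) = -1),
        if_neg (by omega : ¬ ((m : Nat) : Int) = -1),
        if_neg (by omega : ¬ ((l.length + 1 + p : Nat) : Int) + (m : Int) = -1),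
        if_neg (by omega : ¬ ((p : Nat) : Int) + (m : Int) = -1)]
      have he_s := PySem.Chars.findFrom_natCast (l ++ '\n' :: t) ['\n'] (l.length + 1 + (p + m + 1)) (by omega)
      have he_t := PySem.Chars.findFrom_natCast t ['\n'] (p + m + 1) (by omega)
      rw [pvDrop_beyond l t (p + m + 1)] at he_s
      have e1 : (((l.length + 1 + p : Nat) : Int) + (m : Int)) + 1 = ((l.length + 1 + (p + m + 1) : Nat) : Int) := by
        push_cast; ring
      have e2 : (((p : Nat) : Int) + (m : Int)) + 1 = ((p + m + 1 : Nat) : Int) := by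
        push_cast; ring
      rw [e1, e2, he_s, he_t]
      by_cases hq : PySem.Chars.find (List.drop (p + m + 1) t) ['\n'] = -1
      · rw [hq, if_pos (rfl : (-1 : Int) = -1), if_pos (rfl : (-1 : Int) = -1),
          if_pos (rfl : (-1 : Int) = -1), if_pos (rfl : (-1 : Int) = -1)]
        congr 1
        rw [PySem.List.slice_from _ (by positivity), PySem.List.slice_from _ (by positivity)]
        congr 1
        rw [Int.toNat_natCast, Int.toNat_natCast, pvDrop_beyond l t (p + m + 1)]
      · have h0q : 0 ≤ PySem.Chars.find (List.drop (p + m + 1) t) ['\n'] := by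
          have := PySem.Chars.neg_one_le_find (List.drop (p + m + 1) t) ['\n']
          omega
        set q := (PySem.Chars.find (List.drop (p + m + 1) t) ['\n']).toNat with hqdef
        have hqt : PySem.Chars.find (List.drop (p + m + 1) t) ['\n'] = (q : Int) := by omega
        rw [hqt, if_neg (by omega : ¬ ((q : Nat) : Int) = -1),
          if_neg (by omega : ¬ ((q : Nat) : Int) = -1),
          if_neg (by omega : ¬ ((l.length + 1 + (p + m + 1) : Nat) : Int) + (q : Int) = -1),
          if_neg (by omega : ¬ ((p + m + 1 : Nat) : Int) + (q : Int) = -1)]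
        congr 1
        rw [PySem.List.slice_toNat _ (by positivity) (by positivity),
          PySem.List.slice_toNat _ (by positivity) (by positivity),
          Int.toNat_natCast, Int.toNat_natCast, pvDrop_beyond l t (p + m + 1)]
        have hcnt : ((((l.length + 1 + (p + m + 1) : Nat) : Int) + (q : Int)).toNat - (l.length + 1 + (p + m + 1)))
            = ((((p + m + 1 : Nat) : Int) + (q : Int)).toNat - (p + m + 1)) := by omega
        rw [hcnt]
  -- end pvBcore_skip

-- the hit line: find, the newline after it, then the slice up to the next newline
lemma pvBcore_hit_last (l t : List Char) (hl : '\n' ∉ l) (ht : '\n' ∉ t)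
    (hiss : "ISSUE".toList <:+: l) :
    pvBcore (l ++ '\n' :: t) = some (PySem.Chars.strip t) := by
  have hfl := pvFind_left l t "ISSUE".toList hiss
  have h0 : 0 ≤ PySem.Chars.find l "ISSUE".toList :=
    (PySem.Chars.find_nonneg_iff l "ISSUE".toList).mpr hiss
  set p := (PySem.Chars.find l "ISSUE".toList).toNat with hpdef
  have hpe : PySem.Chars.find l "ISSUE".toList = (p : Int) := by omega
  have hple : p ≤ l.length := by
    have := PySem.Chars.find_le_length l "ISSUE".toList
    omega
  have hlen_s : (l ++ '\n' :: t).length = l.length + 1 + t.length := by simp; omega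
  have hnl := PySem.Chars.findFrom_natCast (l ++ '\n' :: t) ['\n'] p (by omega)
  rw [List.drop_append_of_le_length hple,
    pvFind_nl_boundary (List.drop p l) t (fun h => hl (List.mem_of_mem_drop h))] at hnl
  simp only [List.length_drop] at hnl
  rw [if_neg (by omega : ¬ ((l.length - p : Nat) : Int) = -1)] at hnl
  have hnlv : PySem.Chars.findFrom (l ++ '\n' :: t) ['\n'] ((p : Nat) : Int) = ((l.length : Nat) : Int) := by
    rw [hnl]; omega
  have hdrop : List.drop (l.length + 1) (l ++ '\n' :: t) = t := by
    have h0 := pvDrop_beyond l t 0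
    simp only [Nat.add_zero, List.drop_zero] at h0
    exact h0
  have he := PySem.Chars.findFrom_natCast (l ++ '\n' :: t) ['\n'] (l.length + 1) (by omega)
  rw [hdrop, pvFind_nl_none t ht] at he
  push_cast at he
  rw [pvBcore_eq, hfl, hpe, if_neg (by omega : ¬ ((p : Nat) : Int) = -1), hnlv,
    if_neg (by omega : ¬ ((l.length : Nat) : Int) = -1), he, if_pos (rfl : (-1 : Int) = -1),
    PySem.List.slice_from _ (by positivity),
    show ((l.length : Int) + 1).toNat = l.length + 1 from by omega, hdrop]

lemma pvBcore_hit_mid (l l2 u : List Char) (hl : '\n' ∉ l) (hl2 : '\n' ∉ l2)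
    (hiss : "ISSUE".toList <:+: l) :
    pvBcore (l ++ '\n' :: (l2 ++ '\n' :: u)) = some (PySem.Chars.strip l2) := by
  set t := l2 ++ '\n' :: u with htdef
  have hfl := pvFind_left l t "ISSUE".toList hiss
  have h0 : 0 ≤ PySem.Chars.find l "ISSUE".toList :=
    (PySem.Chars.find_nonneg_iff l "ISSUE".toList).mpr hiss
  set p := (PySem.Chars.find l "ISSUE".toList).toNat with hpdef
  have hpe : PySem.Chars.find l "ISSUE".toList = (p : Int) := by omega
  have hple : p ≤ l.length := by
    have := PySem.Chars.find_le_length l "ISSUE".toList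
    omega
  have hlen_s : (l ++ '\n' :: t).length = l.length + 1 + t.length := by simp; omega
  have hnl := PySem.Chars.findFrom_natCast (l ++ '\n' :: t) ['\n'] p (by omega)
  rw [List.drop_append_of_le_length hple,
    pvFind_nl_boundary (List.drop p l) t (fun h => hl (List.mem_of_mem_drop h))] at hnl
  simp only [List.length_drop] at hnl
  rw [if_neg (by omega : ¬ ((l.length - p : Nat) : Int) = -1)] at hnl
  have hnlv : PySem.Chars.findFrom (l ++ '\n' :: t) ['\n'] ((p : Nat) : Int) = ((l.length : Nat) : Int) := by
    rw [hnl]; omega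
  have hdrop : List.drop (l.length + 1) (l ++ '\n' :: t) = t := by
    have h0 := pvDrop_beyond l t 0
    simp only [Nat.add_zero, List.drop_zero] at h0
    exact h0
  have he := PySem.Chars.findFrom_natCast (l ++ '\n' :: t) ['\n'] (l.length + 1) (by omega)
  rw [hdrop, htdef, pvFind_nl_boundary l2 u hl2,
    if_neg (by omega : ¬ ((l2.length : Nat) : Int) = -1)] at he
  push_cast at he
  rw [pvBcore_eq, hfl, hpe, if_neg (by omega : ¬ ((p : Nat) : Int) = -1), hnlv,
    if_neg (by omega : ¬ ((l.length : Nat) : Int) = -1), he,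
    if_neg (by omega : ¬ ((l.length : Int) + 1 + (l2.length : Int)) = -1),
    PySem.List.slice_toNat _ (by positivity) (by positivity)]
  congr 1
  rw [show ((l.length : Int) + 1).toNat = l.length + 1 from by omega, hdrop,
    show ((l.length : Int) + 1 + (l2.length : Int)).toNat - (l.length + 1) = l2.length from by omega,
    htdef, List.take_left]

-- the heart: A's per-line scan equals B's flat search, by induction on the line list
lemma pvMain (L : List (List Char)) (hne : L ≠ []) (hfree : ∀ l ∈ L, '\n' ∉ l) :
    pvAcore L = pvBcore (pvJoin L) := by
  induction L with
  | nil => exact absurd rfl hne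
  | cons l L' ih =>
    cases L' with
    | nil =>
      rw [pvAcore_nil_tail, show pvJoin [l] = l from rfl,
        pvBcore_single l (hfree l (by simp))]
    | cons l2 r =>
      have hl : '\n' ∉ l := hfree l (by simp)
      have hl2 : '\n' ∉ l2 := hfree l2 (by simp)
      have hjoin : pvJoin (l :: l2 :: r) = l ++ '\n' :: pvJoin (l2 :: r) := rfl
      by_cases hiss : PySem.Chars.isIn "ISSUE".toList l = true
      · rw [pvAcore_hit l l2 r hiss, hjoin]
        have hinf : "ISSUE".toList <:+: l := (PySem.Chars.isIn_iff_infix _ _).mp hiss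
        cases r with
        | nil =>
          rw [show pvJoin [l2] = l2 from rfl, pvBcore_hit_last l l2 hl hl2 hinf]
        | cons r1 r' =>
          rw [show pvJoin (l2 :: r1 :: r') = l2 ++ '\n' :: pvJoin (r1 :: r') from rfl,
            pvBcore_hit_mid l l2 (pvJoin (r1 :: r')) hl hl2 hinf]
      · have hiss' : PySem.Chars.isIn "ISSUE".toList l = false := by
          simpa using hiss
        rw [pvAcore_cons l (l2 :: r) hiss', hjoin,
          pvBcore_skip l (pvJoin (l2 :: r))
            (fun h => hiss ((PySem.Chars.isIn_iff_infix _ _).mpr h)),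
          ih (by simp) (fun x hx => hfree x (by simp [hx]))]

-- ===== VERDICT (by name: the statement is the Claim_ definition above) =====
theorem extract_issue_spec : Claim_equal_extract_issue := by
  intro text _
  unfold Spec_extract_issue
  rw [pvA_to_core, pvB_to_core]
  have h := pvMain ((pvLinesOf text.toList).1 :: (pvLinesOf text.toList).2) (by simp)
    (by
      intro l hl
      rcases List.mem_cons.mp hl with h | h
      · exact h ▸ (pvLinesOf_nlfree text.toList).1
      · exact (pvLinesOf_nlfree text.toList).2 l h)
  rw [pvSplitOn_nl, h, pvJoin_linesOf]
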